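-- pv_equiv track=rewrite | github.com/johnflavin/advent-of-code | src/aoc/aoc2024/day_19.py | part_one
-- ===== SOURCE A (Python) =====
-- from collections.abc import Iterable
-- from functools import cache
--
-- def part_one(lines: Iterable[str]) -> int:
--     lines = iter(lines)
--     available = set(next(lines).split(", "))
--     max_len_available = max(map(len, available))
--
--     next(lines)  # Blank
--
--     @cache
--     def is_possible(design: str) -> bool:
--         ld = len(design)
--         if ld == 1:
--             result = design in available
--         elif ld <= max_len_available and design in available:
--             result = True
--         else:
--             result = any(
--                 design[: split_idx + 1] in available
--                 and is_possible(design[split_idx + 1 :])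
--                 for split_idx in range(len(design))
--             )
--         return result
--
--     return sum(is_possible(design_str) for design_str in lines)
-- ===== SOURCE B (Python) =====
-- def part_one(lines):
--     it = iter(lines)
--     available = set(next(it).split(", "))
--     max_len = max(map(len, available))
--     next(it)  # Blank
--     total = 0
--     for s in it:
--         if _buildable(s, available, max_len):
--             total += 1
--     return total
--
--
-- def _buildable(s, available, max_len):
--     # Bottom-up DP over suffixes: dp[k-1] says whether the suffix shorter by k
--     # than the current one is buildable (the empty suffix counts as buildable).
--     if not s:
--         return "" in available
--     n = len(s)
--     dp = [True]
--     for m in range(1, n + 1):  # m = length of the suffix being decided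
--         i = n - m
--         v = any(s[i:i + k] in available and dp[k - 1]
--                 for k in range(1, min(max_len, m) + 1))
--         dp = [v] + dp
--     return dp[0]
-- ===== Notes on version B (the rewrite author's own statement) =====
-- stated objective: alternative
-- what changed: The cached top-down recursion per design (trying every split prefix, any length) is replaced by an iterative bottom-up DP over suffixes whose inner scan only tries piece lengths up to the longest available pattern.
import Mathlib
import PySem

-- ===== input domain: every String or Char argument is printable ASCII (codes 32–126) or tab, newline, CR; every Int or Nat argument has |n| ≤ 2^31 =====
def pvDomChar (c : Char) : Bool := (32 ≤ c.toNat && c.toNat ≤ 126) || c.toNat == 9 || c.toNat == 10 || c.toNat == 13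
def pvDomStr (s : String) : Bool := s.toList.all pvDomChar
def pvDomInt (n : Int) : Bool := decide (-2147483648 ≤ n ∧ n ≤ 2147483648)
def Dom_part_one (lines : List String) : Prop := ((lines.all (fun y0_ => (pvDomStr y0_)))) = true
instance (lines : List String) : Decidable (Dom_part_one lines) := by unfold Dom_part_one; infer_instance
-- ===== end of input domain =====

-- B replaces A's memoized top-down recursion per design by an iterative bottom-up DP over
-- suffixes whose inner scan is capped at the longest available piece (objective: alternative).


-- ===== PORT A =====
-- A's cached recursive is_possible; the cache changes only speed, never the value, so the
-- port is the plain recursion.  design[:k+1] / design[k+1:] are List.take / List.drop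
-- (exact here: both bounds are nonnegative, and Python's clamping agrees with take/drop).
def isPossibleA (av : PySem.Set (List Char)) (maxLen : Int) (design : List Char) : Bool :=
  let ld := design.length
  if ld = 1 then PySem.Set.contains av design
  else if decide ((ld : Int) ≤ maxLen) && PySem.Set.contains av design then true
  else
    (List.range design.length).attach.any (fun ⟨k, _hk⟩ =>
      PySem.Set.contains av (design.take (k + 1)) &&
        isPossibleA av maxLen (design.drop (k + 1)))
termination_by design.length
decreasing_by
  have hk := List.mem_range.mp _hk
  simp only [List.length_drop]; omega

def part_one (lines : List String) : Int :=
  match lines with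
  | l0 :: _blank :: rest =>
      let available : PySem.Set (List Char) :=
        PySem.Set.ofList (PySem.Chars.splitOn l0.toList (", ".toList))
      -- available is never empty (split returns at least one piece), so Python's max always
      -- receives a nonempty iterable; `.getD 0` is an unreachable-`none` default.
      let maxLen : Int :=
        (PySem.List.max? (available.map (fun p => (p.length : Int))) (fun x => x)).getD 0
      (rest.map (fun d => if isPossibleA available maxLen d.toList then (1 : Int) else 0)).sum
  | _ => 0  -- fewer than two lines: Python raises StopIteration; excluded by Pre_

-- ===== PORT B =====
-- Source B's loop body: one DP step deciding the suffix of length m (the indices used are the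
-- nonnegative i = n - m and i + k, where slice/pyGetD agree with Python's indexing).
def stepB (av : PySem.Set (List Char)) (maxLen : Int) (s : List Char)
    (dp : List Bool) (m : Int) : List Bool :=
  let i : Int := (s.length : Int) - m
  ((PySem.List.pyRange 1 (min maxLen m + 1)).any (fun k =>
      PySem.Set.contains av (PySem.List.slice s (some i) (some (i + k))) &&
        PySem.List.pyGetD dp (k - 1) false)) :: dp

-- Source B's _buildable: dp collects, shortest suffix first, whether each proper suffix of s
-- is buildable (seeded with True for the empty suffix).
def buildableB (av : PySem.Set (List Char)) (maxLen : Int) (s : List Char) : Bool :=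
  if s.isEmpty then PySem.Set.contains av []
  else
    let dp := (PySem.List.pyRange 1 ((s.length : Int) + 1)).foldl (stepB av maxLen s) [true]
    PySem.List.pyGetD dp 0 false

def part_one_alt (lines : List String) : Int :=
  match lines with
  | [] => 0  -- fewer than two lines: Source B raises StopIteration too; excluded by Pre_
  | l0 :: rest0 =>
    match rest0 with
    | [] => 0  -- ditto
    | _blank :: rest =>
        let available : PySem.Set (List Char) :=
          PySem.Set.ofList (PySem.Chars.splitOn l0.toList (", ".toList))
        let maxLen : Int :=
          (PySem.List.max? (available.map (fun p => (p.length : Int))) (fun x => x)).getD 0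
        rest.foldl (fun total d => if buildableB available maxLen d.toList then total + 1 else total) 0

-- ===== PRECONDITION & SPEC =====
-- A calls next() twice before reading any design, so on fewer than two lines Python raises
-- StopIteration; exactly those inputs are excluded.
def Pre_part_one (lines : List String) : Prop := 2 ≤ lines.length
instance (lines : List String) : Decidable (Pre_part_one lines) := by unfold Pre_part_one; infer_instance
def pvWitness_part_one : List String := ["a, ab", "", "aab", "b", ""]

def Spec_part_one (lines : List String) (out : Int) : Prop := out = part_one_alt lines
instance (lines : List String) (out : Int) : Decidable (Spec_part_one lines out) := by unfold Spec_part_one; infer_instance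

-- ===== CLAIM (what is proved, stated in full; the proofs are below) =====
def Claim_equal_part_one : Prop := ∀ (lines : List String), Dom_part_one lines → Pre_part_one lines → Spec_part_one lines (part_one lines)

-- ===== LEMMAS AND PROOFS =====

-- The common specification: t splits into nonempty available pieces (the empty t trivially).
def canSplit (av : PySem.Set (List Char)) (t : List Char) : Bool :=
  t.isEmpty ||
    (List.range t.length).attach.any (fun ⟨k, _hk⟩ =>
      PySem.Set.contains av (t.take (k + 1)) && canSplit av (t.drop (k + 1)))
termination_by t.length
decreasing_by
  have hk := List.mem_range.mp _hk
  simp only [List.length_drop]; omega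

theorem canSplit_eq (av : PySem.Set (List Char)) (t : List Char) :
    canSplit av t = (t.isEmpty ||
      (List.range t.length).any (fun k =>
        PySem.Set.contains av (t.take (k + 1)) && canSplit av (t.drop (k + 1)))) := by
  rw [canSplit, Bool.eq_iff_iff]; simp [List.any_eq_true]; tauto

theorem canSplit_nil (av : PySem.Set (List Char)) : canSplit av [] = true := by
  rw [canSplit_eq]; simp

theorem isPossibleA_nil (av : PySem.Set (List Char)) (maxLen : Int) (h0 : 0 ≤ maxLen) :
    isPossibleA av maxLen [] = PySem.Set.contains av [] := by
  rw [isPossibleA]; simp [h0]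

theorem isPossibleA_eq_canSplit (av : PySem.Set (List Char)) (maxLen : Int)
    (h0 : 0 ≤ maxLen) (hm : ∀ p ∈ av, (p.length : Int) ≤ maxLen) (t : List Char) :
    isPossibleA av maxLen t = if t.isEmpty then PySem.Set.contains av [] else canSplit av t := by
  suffices H : ∀ n (t : List Char), t.length ≤ n →
      isPossibleA av maxLen t = if t.isEmpty then PySem.Set.contains av [] else canSplit av t from
    H t.length t le_rfl
  intro n
  induction n with
  | zero =>
    intro t ht
    have : t = [] := List.length_eq_zero_iff.mp (Nat.le_zero.mp ht)
    subst this
    simp [isPossibleA_nil av maxLen h0]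
  | succ n ih =>
    intro t ht
    by_cases hE : t = []
    · subst hE; simp [isPossibleA_nil av maxLen h0]
    have hlen : 1 ≤ t.length := List.length_pos_of_ne_nil hE
    have hE' : t.isEmpty = false := by simp [hE]
    rw [isPossibleA, canSplit_eq, hE']
    rw [Bool.eq_iff_iff]
    simp
    have hdropE : ∀ k : Nat, ¬ t.length ≤ k + 1 → (List.drop (k+1) t).isEmpty = false := by
      intro k hd
      simp only [Bool.eq_false_iff, ne_eq, List.isEmpty_iff, List.drop_eq_nil_iff]
      omega
    by_cases h1 : t.length = 1
    · rw [if_pos h1]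
      constructor
      · intro h
        exact ⟨0, by omega, by rwa [List.take_of_length_le (by omega)],
          by rw [List.drop_eq_nil_of_le (by omega)]; exact canSplit_nil av⟩
      · rintro ⟨k, hk, hin, -⟩
        have hk0 : k = 0 := by omega
        subst hk0
        rwa [List.take_of_length_le (by omega)] at hin
    · rw [if_neg h1]
      constructor
      · rintro (⟨hle, hmem⟩ | ⟨k, hin, hk, hrec⟩)
        · exact ⟨t.length - 1, by omega, by rwa [List.take_of_length_le (by omega)],
            by rw [List.drop_eq_nil_of_le (by omega)]; exact canSplit_nil av⟩
        · refine ⟨k, hk, hin, ?_⟩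
          by_cases hd : t.length ≤ k + 1
          · rw [List.drop_eq_nil_of_le hd]; exact canSplit_nil av
          · rw [ih _ (by simp only [List.length_drop]; omega)] at hrec
            simpa [hdropE k hd] using hrec
      · rintro ⟨k, hk, hin, hcan⟩
        by_cases hd : t.length ≤ k + 1
        · have hmem : t ∈ av := by rwa [List.take_of_length_le hd] at hin
          exact Or.inl ⟨hm t hmem, hmem⟩
        · refine Or.inr ⟨k, hin, hk, ?_⟩
          rw [ih _ (by simp only [List.length_drop]; omega)]
          simp [hdropE k hd, hcan]

theorem head_eq (av : PySem.Set (List Char)) (maxLen : Int)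
    (hm : ∀ p ∈ av, (p.length : Int) ≤ maxLen)
    (s : List Char) (M : Nat) (hM : M + 1 ≤ s.length) :
    ((PySem.List.pyRange 1 (min maxLen ((M : Int) + 1) + 1)).any (fun k =>
        PySem.Set.contains av (PySem.List.slice s (some ((s.length : Int) - ((M : Int) + 1)))
          (some (((s.length : Int) - ((M : Int) + 1)) + k))) &&
        PySem.List.pyGetD
          ((List.range (M + 1)).map (fun j => canSplit av (s.drop (s.length - M + j))))
          (k - 1) false))
      = canSplit av (s.drop (s.length - (M + 1))) := by
  have ht : (s.drop (s.length - (M + 1))).length = M + 1 := by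
    simp only [List.length_drop]; omega
  have htE : (s.drop (s.length - (M + 1))).isEmpty = false := by
    simp only [Bool.eq_false_iff, ne_eq, List.isEmpty_iff, List.drop_eq_nil_iff]
    omega
  have hslice : ∀ k : Int, 1 ≤ k → k ≤ (M : Int) + 1 →
      PySem.List.slice s (some ((s.length : Int) - ((M : Int) + 1)))
        (some (((s.length : Int) - ((M : Int) + 1)) + k))
      = (s.drop (s.length - (M + 1))).take k.toNat := by
    intro k hk1 hk2
    have hi : (s.length : Int) - ((M : Int) + 1) = ((s.length - (M + 1) : Nat) : Int) := by omega
    have hik : (s.length : Int) - ((M : Int) + 1) + k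
        = ((s.length - (M + 1) + k.toNat : Nat) : Int) := by omega
    rw [hik, hi, PySem.List.slice_natCast]
    congr 1
    omega
  have hdp : ∀ k : Int, 1 ≤ k → k ≤ (M : Int) + 1 →
      PySem.List.pyGetD
        ((List.range (M + 1)).map (fun j => canSplit av (s.drop (s.length - M + j))))
        (k - 1) false
      = canSplit av ((s.drop (s.length - (M + 1))).drop k.toNat) := by
    intro k hk1 hk2
    have hk' : k - 1 = ((k.toNat - 1 : Nat) : Int) := by omega
    rw [hk', PySem.List.pyGetD_natCast,
      PySem.List.getD_map_range _ _ _ _ (by omega)]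
    rw [List.drop_drop]
    congr 2
    omega
  rw [canSplit_eq, htE, ht, Bool.false_or, Bool.eq_iff_iff]
  simp only [List.any_eq_true, PySem.List.mem_pyRange_one, List.mem_range, Bool.and_eq_true]
  constructor
  · rintro ⟨k, ⟨hk1, hk2⟩, hcont, hrec⟩
    have hkM : k ≤ (M : Int) + 1 := by omega
    have hidx : k.toNat - 1 + 1 = k.toNat := by omega
    refine ⟨k.toNat - 1, by omega, ?_, ?_⟩
    · rw [hidx, ← hslice k hk1 hkM]; exact hcont
    · rw [hidx, ← hdp k hk1 hkM]; exact hrec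
  · rintro ⟨k', hk', hcont, hrec⟩
    have hlenpiece : ((s.drop (s.length - (M + 1))).take (k' + 1)).length = k' + 1 := by
      simp only [List.length_take, ht]; omega
    have hmem : (s.drop (s.length - (M + 1))).take (k' + 1) ∈ av := by
      simpa using hcont
    have hle : ((k' + 1 : Nat) : Int) ≤ maxLen := by
      have h := hm _ hmem
      rw [hlenpiece] at h
      exact_mod_cast h
    have hk1 : (1 : Int) ≤ ((k' + 1 : Nat) : Int) := by omega
    have hkM : ((k' + 1 : Nat) : Int) ≤ (M : Int) + 1 := by omega
    have htn : ((k' + 1 : Nat) : Int).toNat = k' + 1 := by omega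
    refine ⟨((k' + 1 : Nat) : Int), ⟨by omega, by omega⟩, ?_, ?_⟩
    · rw [hslice _ hk1 hkM, htn]; exact hcont
    · rw [hdp _ hk1 hkM, htn]; exact hrec

theorem dp_inv (av : PySem.Set (List Char)) (maxLen : Int)
    (hm : ∀ p ∈ av, (p.length : Int) ≤ maxLen)
    (s : List Char) (M : Nat) (hM : M ≤ s.length) :
    (PySem.List.pyRange 1 ((M : Int) + 1)).foldl (stepB av maxLen s) [true]
      = (List.range (M + 1)).map (fun j => canSplit av (s.drop (s.length - M + j))) := by
  induction M with
  | zero =>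
    have h1 : PySem.List.pyRange 1 ((0 : Nat) + 1) = [] := by
      simp [PySem.List.pyRange]
    rw [h1]
    simp [List.range_succ_eq_map, List.drop_length, canSplit_nil]
  | succ M ih =>
    have hM' : M ≤ s.length := by omega
    have hsplit : PySem.List.pyRange 1 ((M + 1 : Nat) + 1)
        = PySem.List.pyRange 1 ((M : Nat) + 1) ++ [(M : Int) + 1] := by
      have hcast : ((M + 1 : Nat) : Int) + 1 = (M : Int) + 2 := by push_cast; ring
      rw [hcast, PySem.List.pyRange_one_append 1 ((M : Int) + 1) ((M : Int) + 2) (by omega) (by omega)]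
      congr 1
      rw [PySem.List.pyRange_one_cons (by omega)]
      have h2 : ((M : Int) + 1 + 1) = (M : Int) + 2 := by ring
      rw [h2]
      have : PySem.List.pyRange ((M : Int) + 2) ((M : Int) + 2) = [] := by
        have := @PySem.List.mem_pyRange_one ((M : Int) + 2) ((M : Int) + 2)
        cases hh : PySem.List.pyRange ((M : Int) + 2) ((M : Int) + 2) with
        | nil => rfl
        | cons a l =>
          exfalso
          have ha := (this (x := a)).mp (by rw [hh]; exact List.mem_cons_self)
          omega
      rw [this]
    rw [hsplit, List.foldl_append]
    rw [List.range_succ_eq_map (n := M + 1)]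
    simp only [List.map_cons, List.map_map]
    rw [ih hM']
    simp only [List.foldl_cons, List.foldl_nil, stepB]
    congr 1
    · rw [head_eq av maxLen hm s M hM]
      norm_num
    · apply List.map_congr_left
      intro j hj
      have hj' := List.mem_range.mp hj
      simp only [Function.comp_apply]
      congr 2
      omega

theorem buildableB_eq_canSplit (av : PySem.Set (List Char)) (maxLen : Int)
    (hm : ∀ p ∈ av, (p.length : Int) ≤ maxLen) (s : List Char) :
    buildableB av maxLen s = if s.isEmpty then PySem.Set.contains av [] else canSplit av s := by
  by_cases hE : s = []
  · subst hE; rw [buildableB]; simp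
  · have hE' : s.isEmpty = false := by simp [hE]
    rw [buildableB, hE']
    simp only [Bool.false_eq_true, if_false]
    rw [dp_inv av maxLen hm s s.length le_rfl]
    rw [show (0 : Int) = ((0 : Nat) : Int) from rfl, PySem.List.pyGetD_natCast,
      PySem.List.getD_map_range _ _ _ _ (by omega)]
    have hz : s.length - s.length + 0 = 0 := by omega
    rw [hz, List.drop_zero]

theorem foldl_count_eq_sum_map (p : String → Bool) (rest : List String) (acc : Int) :
    rest.foldl (fun total d => if p d then total + 1 else total) acc
      = acc + (rest.map (fun d => if p d then (1 : Int) else 0)).sum := by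
  induction rest generalizing acc with
  | nil => simp
  | cons d tl ih => simp only [List.foldl_cons, List.map_cons, List.sum_cons, ih]; split_ifs <;> ring

theorem maxLen_bounds (av : PySem.Set (List Char)) :
    0 ≤ (PySem.List.max? (av.map (fun p => (p.length : Int))) (fun x => x)).getD 0
    ∧ ∀ p ∈ av, (p.length : Int) ≤
        (PySem.List.max? (av.map (fun p => (p.length : Int))) (fun x => x)).getD 0 := by
  rcases hmx : PySem.List.max? (av.map (fun p => (p.length : Int))) (fun x => x) with _ | M
  · have hnil : av = [] := by
      have h := (PySem.List.max?_eq_none_iff (av.map (fun p => (p.length : Int))) (fun x => x)).mp hmx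
      simpa using h
    subst hnil
    rw [hmx]
    exact ⟨by simp, by intro p hp; simp at hp⟩
  · have hmem := PySem.List.max?_mem hmx
    have hmax := PySem.List.max?_isMax hmx
    rw [hmx]
    simp only [Option.getD_some]
    constructor
    · rcases List.mem_map.mp hmem with ⟨p, -, hp⟩
      omega
    · intro p hp
      exact hmax _ (List.mem_map.mpr ⟨p, hp, rfl⟩)

theorem ports_agree (lines : List String) (hpre : 2 ≤ lines.length) :
    part_one lines = part_one_alt lines := by
  match lines with
  | [] => simp at hpre
  | [_] => simp at hpre
  | l0 :: blank :: rest =>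
    rw [part_one, part_one_alt]
    obtain ⟨h0, hm⟩ := maxLen_bounds (PySem.Set.ofList (PySem.Chars.splitOn l0.toList (", ".toList)))
    rw [foldl_count_eq_sum_map, zero_add]
    congr 1
    apply List.map_congr_left
    intro d _
    rw [isPossibleA_eq_canSplit _ _ h0 hm, buildableB_eq_canSplit _ _ hm]

-- ===== VERDICT (by name: the statement is the Claim_ definition above) =====
theorem part_one_spec : Claim_equal_part_one := by
  intro lines _hdom hpre
  unfold Spec_part_one
  exact ports_agree lines hpre
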